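-- pv_equiv track=rewrite | github.com/powy-e/FP_Prado | main.py | verificar_rochas_animais
-- ===== SOURCE A (Python) =====
-- def obter_pos_x(pos):
--     """
--     obter_pos_x: posicao -> int
--     retorna a componente x da posicao
--     """
--     return pos[0]
--
-- def obter_pos_y(pos):
--     """
--     obter_pos_y: posicao -> int
--     retorna a componente y da posicao
--     """
--     return pos[1]
--
-- def eh_posicao(arg):
--     """
--     eh_posicao: universal -> booleano
--     retorna True se o argumento passado for uma posicao, caso contrario retorna False
--     """
--
--     return isinstance(arg, tuple) and len(arg) == 2 and isinstance(obter_pos_y(arg), int) \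
--            and isinstance(obter_pos_x(arg), int) and obter_pos_y(arg) >= 0 and obter_pos_x(arg) >= 0
--
-- def posicoes_iguais(p1, p2):
--     """
--     posicoes_iguais: posicao x posicao -> booleano
--     devolve True se p1 e p2 sao posicoes iguais
--     """
--
--     return eh_posicao(p1) and eh_posicao(p2) and p1 == p2
--
-- def verificar_rochas_animais(limite, rochas, ani_pos) -> bool:
--     """
--     funcao auxiliar
--     verificar_rochas_animais: pos x tuplo x tuplo
--     esta funcao retorna True se todas as rochas/animais se encontram dentro dos
--                                                                         limites
--     """
--
--     if rochas:
--         for rochedo in rochas: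
--             if not (0 < obter_pos_x(rochedo) < obter_pos_x(limite)) \
--                     or not (0 < obter_pos_y(rochedo) < obter_pos_y(limite)):
--                 return False
--             for animal in ani_pos:
--                 if not (0 < obter_pos_x(animal) < obter_pos_x(limite)) \
--                         or not (0 < obter_pos_y(animal) < obter_pos_y(limite)) \
--                         or posicoes_iguais(animal, rochedo):
--                     return False
--     else:
--         for animal in ani_pos:
--             if not (0 < obter_pos_x(animal) < obter_pos_x(limite)) \
--                     or not (0 < obter_pos_y(animal) < obter_pos_y(limite)):
--                 return False
--     return True
-- ===== SOURCE B (Python) =====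
-- def obter_pos_x(pos):
--     return pos[0]
--
-- def obter_pos_y(pos):
--     return pos[1]
--
-- def eh_posicao(arg):
--     return isinstance(arg, tuple) and len(arg) == 2 and isinstance(obter_pos_y(arg), int) \
--            and isinstance(obter_pos_x(arg), int) and obter_pos_y(arg) >= 0 and obter_pos_x(arg) >= 0
--
-- def posicoes_iguais(p1, p2):
--     return eh_posicao(p1) and eh_posicao(p2) and p1 == p2
--
-- def verificar_rochas_animais(limite, rochas, ani_pos) -> bool:
--     """Three independent passes: rock bounds, animal bounds, then overlap pairs."""
--     def dentro(p):
--         return 0 < p[0] < limite[0] and 0 < p[1] < limite[1]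
--     return (all(dentro(r) for r in rochas)
--             and all(dentro(a) for a in ani_pos)
--             and not any(posicoes_iguais(a, r) for a in ani_pos for r in rochas))
-- ===== Notes on version B (the rewrite author's own statement) =====
-- stated objective: simpler
-- what changed: Replaced A's branching on empty-vs-nonempty rock list and its nested loop that re-checks every animal's bounds once per rock with three independent flat passes (all rocks in bounds, all animals in bounds, no animal/rock overlap) combined with all/any.
import Mathlib
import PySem

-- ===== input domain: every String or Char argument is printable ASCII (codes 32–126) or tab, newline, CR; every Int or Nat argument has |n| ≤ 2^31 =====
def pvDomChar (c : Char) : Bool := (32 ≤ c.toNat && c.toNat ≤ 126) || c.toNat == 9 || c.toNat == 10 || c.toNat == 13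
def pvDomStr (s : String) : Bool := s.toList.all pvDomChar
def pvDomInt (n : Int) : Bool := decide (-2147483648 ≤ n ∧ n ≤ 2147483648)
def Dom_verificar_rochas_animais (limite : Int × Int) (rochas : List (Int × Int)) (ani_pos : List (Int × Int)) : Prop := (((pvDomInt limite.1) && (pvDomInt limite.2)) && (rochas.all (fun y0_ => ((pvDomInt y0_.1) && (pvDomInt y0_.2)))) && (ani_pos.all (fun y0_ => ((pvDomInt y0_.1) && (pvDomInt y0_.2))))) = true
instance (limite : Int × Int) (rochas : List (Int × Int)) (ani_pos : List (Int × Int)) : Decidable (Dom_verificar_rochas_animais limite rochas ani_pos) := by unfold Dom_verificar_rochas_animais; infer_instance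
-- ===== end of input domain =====

-- B replaces A's empty/nonempty branching and nested re-checking of animal bounds per rock
-- with three independent flat passes (simpler decomposition, same cost).

-- ===== PORT A =====
-- module helpers (shared by both ports, as in the Python module)
def eh_posicao (arg : Int × Int) : Bool :=
  decide (arg.2 ≥ 0) && decide (arg.1 ≥ 0)

def posicoes_iguais (p1 p2 : Int × Int) : Bool :=
  eh_posicao p1 && eh_posicao p2 && decide (p1 = p2)

-- inner 'for animal in ani_pos' loop of A (nonempty-rochas branch), early return False
def pvA_innerAnimais (limite rochedo : Int × Int) : List (Int × Int) → Bool
  | [] => true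
  | animal :: rest =>
    if ¬ (0 < animal.1 ∧ animal.1 < limite.1) ∨ ¬ (0 < animal.2 ∧ animal.2 < limite.2)
        ∨ posicoes_iguais animal rochedo = true then false
    else pvA_innerAnimais limite rochedo rest

-- outer 'for rochedo in rochas' loop of A
def pvA_rochasLoop (limite : Int × Int) (ani_pos : List (Int × Int)) : List (Int × Int) → Bool
  | [] => true
  | rochedo :: rest =>
    if ¬ (0 < rochedo.1 ∧ rochedo.1 < limite.1) ∨ ¬ (0 < rochedo.2 ∧ rochedo.2 < limite.2) then false
    else if pvA_innerAnimais limite rochedo ani_pos then pvA_rochasLoop limite ani_pos rest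
    else false

-- 'for animal in ani_pos' loop of A's else-branch (rochas empty)
def pvA_animaisLoop (limite : Int × Int) : List (Int × Int) → Bool
  | [] => true
  | animal :: rest =>
    if ¬ (0 < animal.1 ∧ animal.1 < limite.1) ∨ ¬ (0 < animal.2 ∧ animal.2 < limite.2) then false
    else pvA_animaisLoop limite rest

def verificar_rochas_animais (limite : Int × Int) (rochas : List (Int × Int)) (ani_pos : List (Int × Int)) : Bool :=
  match rochas with
  | [] => pvA_animaisLoop limite ani_pos
  | _ :: _ => pvA_rochasLoop limite ani_pos rochas

-- ===== PORT B =====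
def pvB_dentro (limite p : Int × Int) : Bool :=
  decide (0 < p.1 ∧ p.1 < limite.1) && decide (0 < p.2 ∧ p.2 < limite.2)

def verificar_rochas_animais_alt (limite : Int × Int) (rochas : List (Int × Int)) (ani_pos : List (Int × Int)) : Bool :=
  rochas.all (fun r => pvB_dentro limite r)
  && ani_pos.all (fun a => pvB_dentro limite a)
  && !(ani_pos.any fun a => rochas.any fun r => posicoes_iguais a r)

-- ===== PRECONDITION & SPEC =====
def Spec_verificar_rochas_animais (limite : Int × Int) (rochas : List (Int × Int)) (ani_pos : List (Int × Int)) (out : Bool) : Prop := out = verificar_rochas_animais_alt limite rochas ani_pos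
instance (limite : Int × Int) (rochas : List (Int × Int)) (ani_pos : List (Int × Int)) (out : Bool) : Decidable (Spec_verificar_rochas_animais limite rochas ani_pos out) := by unfold Spec_verificar_rochas_animais; infer_instance

-- ===== CLAIM (what is proved, stated in full; the proofs are below) =====
def Claim_equal_verificar_rochas_animais : Prop := ∀ (limite : Int × Int) (rochas : List (Int × Int)) (ani_pos : List (Int × Int)), Dom_verificar_rochas_animais limite rochas ani_pos → Spec_verificar_rochas_animais limite rochas ani_pos (verificar_rochas_animais limite rochas ani_pos)

-- ===== LEMMAS AND PROOFS =====

-- characterisation of A's inner animal loop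
theorem pvA_innerAnimais_iff (limite rochedo : Int × Int) (l : List (Int × Int)) :
    pvA_innerAnimais limite rochedo l = true ↔
      ∀ a ∈ l, (0 < a.1 ∧ a.1 < limite.1) ∧ (0 < a.2 ∧ a.2 < limite.2) ∧ ¬ posicoes_iguais a rochedo = true := by
  induction l with
  | nil => simp [pvA_innerAnimais]
  | cons a t ih =>
    simp only [pvA_innerAnimais, List.mem_cons]
    split_ifs with h
    · simp only [false_iff]
      intro hall
      have hh := hall a (Or.inl rfl)
      tauto
    · push Not at h
      simp only [ih]
      constructor
      · rintro ht x (rfl | hx)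
        · exact ⟨h.1, h.2.1, h.2.2⟩
        · exact ht x hx
      · intro hall; exact fun x hx => hall x (Or.inr hx)

-- characterisation of A's outer rock loop
theorem pvA_rochasLoop_iff (limite : Int × Int) (ani : List (Int × Int)) (l : List (Int × Int)) :
    pvA_rochasLoop limite ani l = true ↔
      ∀ r ∈ l, ((0 < r.1 ∧ r.1 < limite.1) ∧ (0 < r.2 ∧ r.2 < limite.2)) ∧
        pvA_innerAnimais limite r ani = true := by
  induction l with
  | nil => simp [pvA_rochasLoop]
  | cons r t ih =>
    simp only [pvA_rochasLoop, List.mem_cons]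
    split_ifs with h hin
    · push Not at h
      simp only [false_iff]
      intro hall
      have hh := (hall r (Or.inl rfl)).1
      omega
    · push Not at h
      simp only [ih]
      constructor
      · rintro ht x (rfl | hx)
        · exact ⟨⟨h.1, h.2⟩, hin⟩
        · exact ht x hx
      · intro hall; exact fun x hx => hall x (Or.inr hx)
    · push Not at h
      simp only [false_iff]
      intro hall
      exact hin ((hall r (Or.inl rfl)).2)

-- characterisation of A's else-branch animal loop
theorem pvA_animaisLoop_iff (limite : Int × Int) (l : List (Int × Int)) :
    pvA_animaisLoop limite l = true ↔
      ∀ a ∈ l, (0 < a.1 ∧ a.1 < limite.1) ∧ (0 < a.2 ∧ a.2 < limite.2) := by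
  induction l with
  | nil => simp [pvA_animaisLoop]
  | cons a t ih =>
    simp only [pvA_animaisLoop, List.mem_cons]
    split_ifs with h
    · push Not at h
      simp only [false_iff]
      intro hall
      have hh := hall a (Or.inl rfl)
      omega
    · push Not at h
      simp only [ih]
      constructor
      · rintro ht x (rfl | hx)
        · exact ⟨h.1, h.2⟩
        · exact ht x hx
      · intro hall; exact fun x hx => hall x (Or.inr hx)

-- characterisation of B
theorem pvB_iff (limite : Int × Int) (rochas ani : List (Int × Int)) :
    verificar_rochas_animais_alt limite rochas ani = true ↔
      (∀ r ∈ rochas, (0 < r.1 ∧ r.1 < limite.1) ∧ (0 < r.2 ∧ r.2 < limite.2)) ∧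
      (∀ a ∈ ani, (0 < a.1 ∧ a.1 < limite.1) ∧ (0 < a.2 ∧ a.2 < limite.2)) ∧
      (∀ a ∈ ani, ∀ r ∈ rochas, ¬ posicoes_iguais a r = true) := by
  simp [verificar_rochas_animais_alt, pvB_dentro, List.all_eq_true, List.any_eq_true]
  tauto

-- ===== VERDICT (by name: the statement is the Claim_ definition above) =====
theorem verificar_rochas_animais_spec : Claim_equal_verificar_rochas_animais := by
  intro limite rochas ani _
  unfold Spec_verificar_rochas_animais
  rw [Bool.eq_iff_iff, pvB_iff]
  cases rochas with
  | nil =>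
    simp only [verificar_rochas_animais, pvA_animaisLoop_iff]
    simp
  | cons r rs =>
    simp only [verificar_rochas_animais, pvA_rochasLoop_iff]
    constructor
    · intro h
      refine ⟨fun x hx => (h x hx).1, ?_, ?_⟩
      · intro a ha
        have := (pvA_innerAnimais_iff limite r ani).mp (h r (List.mem_cons_self ..)).2 a ha
        exact ⟨this.1, this.2.1⟩
      · intro a ha x hx
        exact ((pvA_innerAnimais_iff limite x ani).mp (h x hx).2 a ha).2.2
    · rintro ⟨hr, hb, hp⟩ x hx
      refine ⟨hr x hx, (pvA_innerAnimais_iff limite x ani).mpr ?_⟩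
      intro a ha
      exact ⟨(hb a ha).1, (hb a ha).2, hp a ha x hx⟩
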